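-- pv_equiv track=rewrite | github.com/sp9028/P1 | Rešitve starih izpitov/13.8.1.py | valovi
-- ===== SOURCE A (Python) =====
-- def valovi(po_dnevih):
--     vsi_valovi = []
--     vsota = 0
--     for i in range(len(po_dnevih)):
--         if po_dnevih[i] != 0:
--             vsota += po_dnevih[i]
--         if vsota != 0 and po_dnevih[i] == 0:
--             vsi_valovi.append(vsota)
--             vsota = 0
--         if vsota != 0 and i == len(po_dnevih) - 1 and po_dnevih[i] != 0:
--             vsi_valovi.append(vsota)
--
--     return vsi_valovi
-- ===== SOURCE B (Python) =====
-- def valovi(po_dnevih):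
--     vsi_valovi = []
--     run = []
--     for x in po_dnevih:
--         if x == 0:
--             vsota = sum(run)
--             if vsota != 0:
--                 vsi_valovi.append(vsota)
--             run = []
--         else:
--             run.append(x)
--     vsota = sum(run)
--     if vsota != 0:
--         vsi_valovi.append(vsota)
--     return vsi_valovi
-- ===== Notes on version B (the rewrite author's own statement) =====
-- stated objective: idiomatic
-- what changed: B collects each maximal nonzero run into a list and sums it at the run boundary (with one flush after the loop), instead of A's index loop with a running sum and special last-index append logic.
import Mathlib
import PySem

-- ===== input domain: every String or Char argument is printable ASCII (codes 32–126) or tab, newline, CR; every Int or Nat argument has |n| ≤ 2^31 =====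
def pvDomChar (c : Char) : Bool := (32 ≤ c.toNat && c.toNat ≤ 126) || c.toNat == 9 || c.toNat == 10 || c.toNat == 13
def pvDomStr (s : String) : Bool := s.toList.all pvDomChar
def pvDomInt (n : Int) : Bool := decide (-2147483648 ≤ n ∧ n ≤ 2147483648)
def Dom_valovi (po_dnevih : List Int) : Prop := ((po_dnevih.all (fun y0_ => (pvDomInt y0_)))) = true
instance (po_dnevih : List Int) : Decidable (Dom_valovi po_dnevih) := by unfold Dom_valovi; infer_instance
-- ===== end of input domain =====

-- B collects each maximal nonzero run and sums it at the run boundary (one flush after the loop),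
-- instead of A's index loop with a running sum and a special last-index append; same cost, plainer shape.

-- ===== PORT A =====
-- A's loop body as a step function over the index i (state = (vsi_valovi, vsota))
def valoviStep (po_dnevih : List Int) (n : Int) (st : List Int × Int) (i : Int) : List Int × Int :=
  let x := PySem.List.pyGetD po_dnevih i 0
  let vsota := if x ≠ 0 then st.2 + x else st.2
  let st2 := if vsota ≠ 0 ∧ x = 0 then (st.1 ++ [vsota], (0 : Int)) else (st.1, vsota)
  if st2.2 ≠ 0 ∧ i = n - 1 ∧ x ≠ 0 then (st2.1 ++ [st2.2], st2.2) else st2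

def valovi (po_dnevih : List Int) : List Int :=
  let n : Int := po_dnevih.length
  ((PySem.List.pyRange 0 n 1).foldl (valoviStep po_dnevih n) ([], 0)).1

-- ===== PORT B =====
-- B's loop body (state = (vsi_valovi, run)); zeros flush the run, nonzeros extend it
def valoviAltStep (st : List Int × List Int) (x : Int) : List Int × List Int :=
  if x = 0 then
    let vsota := st.2.sum
    (if vsota ≠ 0 then st.1 ++ [vsota] else st.1, [])
  else (st.1, st.2 ++ [x])

def valovi_alt (po_dnevih : List Int) : List Int :=
  let st := po_dnevih.foldl valoviAltStep ([], [])
  let vsota := st.2.sum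
  if vsota ≠ 0 then st.1 ++ [vsota] else st.1

-- ===== PRECONDITION & SPEC =====
def Spec_valovi (po_dnevih : List Int) (out : List Int) : Prop := out = valovi_alt po_dnevih
instance (po_dnevih : List Int) (out : List Int) : Decidable (Spec_valovi po_dnevih out) := by unfold Spec_valovi; infer_instance

-- ===== CLAIM (what is proved, stated in full; the proofs are below) =====
def Claim_equal_valovi : Prop := ∀ (po_dnevih : List Int), Dom_valovi po_dnevih → Spec_valovi po_dnevih (valovi po_dnevih)

-- ===== LEMMAS AND PROOFS =====

-- common specification: the nonzero sums of the maximal nonzero runs, given a pending run sum s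
def runsSpec : List Int → Int → List Int
  | [], s => if s = 0 then [] else [s]
  | x :: t, s => if x = 0 then (if s = 0 then [] else [s]) ++ runsSpec t 0 else runsSpec t (s + x)

-- A's variant: nothing is flushed when the suffix is empty; the flush happens at the last element
def runsSpecA : List Int → Int → List Int
  | [], _ => []
  | x :: t, s =>
    if x = 0 then (if s = 0 then [] else [s]) ++ runsSpecA t 0
    else if t = [] then (if s + x = 0 then [] else [s + x]) else runsSpecA t (s + x)

lemma runsSpecA_eq_runsSpec : ∀ (xs : List Int) (s : Int), (xs = [] → s = 0) →
    runsSpecA xs s = runsSpec xs s := by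
  intro xs
  induction xs with
  | nil => intro s h; simp [runsSpecA, runsSpec, h rfl]
  | cons x t ih =>
    intro s _
    by_cases hx : x = 0
    · subst hx
      rw [show runsSpecA (0 :: t) s = (if s = 0 then [] else [s]) ++ runsSpecA t 0 by
        simp [runsSpecA]]
      rw [ih 0 (fun _ => rfl)]
      simp [runsSpec]
    · cases t with
      | nil => simp [runsSpecA, runsSpec, hx]
      | cons y r =>
        rw [show runsSpecA (x :: y :: r) s = runsSpecA (y :: r) (s + x) by
          simp [runsSpecA, hx]]
        rw [ih (s + x) (by simp)]
        simp [runsSpec, hx]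

lemma valovi_fold (po_dnevih : List Int) :
    ∀ (suffix : List Int) (a : Nat) (vsi : List Int) (s : Int),
    po_dnevih.drop a = suffix →
    ((PySem.List.pyRange (a : Int) (po_dnevih.length : Int) 1).foldl
      (valoviStep po_dnevih (po_dnevih.length : Int)) (vsi, s)).1 = vsi ++ runsSpecA suffix s := by
  intro suffix
  induction suffix with
  | nil =>
    intro a vsi s hdrop
    have ha : po_dnevih.length ≤ a := List.drop_eq_nil_iff.mp hdrop
    rw [PySem.List.pyRange_one_eq_nil (by exact_mod_cast ha)]
    simp [runsSpecA]
  | cons x t ih =>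
    intro a vsi s hdrop
    have halt : a < po_dnevih.length := by
      by_contra h
      rw [List.drop_eq_nil_of_le (by omega)] at hdrop
      simp at hdrop
    have hx : po_dnevih[a] = x := by
      have h0 : (po_dnevih.drop a)[0]'(by simp [hdrop]) = x := by simp [hdrop]
      rw [List.getElem_drop] at h0
      simpa using h0
    have hget : PySem.List.pyGetD po_dnevih (a : Int) 0 = x := by
      rw [PySem.List.pyGetD_natCast, List.getD_eq_getElem _ _ halt, hx]
    have hdrop' : po_dnevih.drop (a + 1) = t := by
      have h := congrArg (List.drop 1) hdrop
      rw [List.drop_drop] at h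
      simpa using h
    rw [PySem.List.pyRange_one_cons (by exact_mod_cast halt), List.foldl_cons]
    by_cases hx0 : x = 0
    · subst hx0
      have hstep : valoviStep po_dnevih (po_dnevih.length : Int) (vsi, s) (a : Int)
          = (vsi ++ (if s = 0 then [] else [s]), 0) := by
        simp only [valoviStep, hget]
        by_cases hs : s = 0 <;> simp [hs]
      rw [hstep]
      have := ih (a + 1) (vsi ++ (if s = 0 then [] else [s])) 0 hdrop'
      push_cast at this ⊢
      rw [this]
      simp [runsSpecA]
    · by_cases ht : t = []
      · subst ht
        have hlast : (a : Int) = (po_dnevih.length : Int) - 1 := by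
          have : po_dnevih.length = a + 1 := by
            have h : (po_dnevih.drop a).length = po_dnevih.length - a := List.length_drop
            rw [hdrop] at h
            simp at h
            omega
          rw [this]; push_cast; ring
        have hstep : valoviStep po_dnevih (po_dnevih.length : Int) (vsi, s) (a : Int)
            = (vsi ++ (if s + x = 0 then [] else [s + x]), s + x) := by
          simp only [valoviStep, hget]
          by_cases hsx : s + x = 0 <;> simp [hx0, hsx, hlast]
        rw [hstep]
        have := ih (a + 1) (vsi ++ (if s + x = 0 then [] else [s + x])) (s + x) hdrop'
        push_cast at this ⊢
        rw [this]
        simp [runsSpecA, hx0]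
      · have hnotlast : (a : Int) ≠ (po_dnevih.length : Int) - 1 := by
          have : a + 1 < po_dnevih.length := by
            have h : (po_dnevih.drop a).length = po_dnevih.length - a := List.length_drop
            rw [hdrop] at h
            cases t with
            | nil => exact absurd rfl ht
            | cons y r => simp at h; omega
          omega
        have hstep : valoviStep po_dnevih (po_dnevih.length : Int) (vsi, s) (a : Int)
            = (vsi, s + x) := by
          simp [valoviStep, hget, hx0, hnotlast]
        rw [hstep]
        have := ih (a + 1) vsi (s + x) hdrop'
        push_cast at this ⊢
        rw [this]
        simp [runsSpecA, hx0, ht]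

lemma valovi_alt_fold : ∀ (xs : List Int) (out run : List Int),
    (let st := xs.foldl valoviAltStep (out, run)
     if st.2.sum ≠ 0 then st.1 ++ [st.2.sum] else st.1) = out ++ runsSpec xs run.sum := by
  intro xs
  induction xs with
  | nil =>
    intro out run
    by_cases h : run.sum = 0 <;> simp [runsSpec, h]
  | cons x t ih =>
    intro out run
    by_cases hx : x = 0
    · subst hx
      simp only [List.foldl_cons, valoviAltStep]
      by_cases hs : run.sum = 0
      · have := ih out []
        simp only [List.sum_nil] at this
        simp [hs, this, runsSpec]
      · have := ih (out ++ [run.sum]) []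
        simp only [List.sum_nil] at this
        simp [hs, this, runsSpec]
    · simp only [List.foldl_cons, valoviAltStep, if_neg hx]
      have := ih out (run ++ [x])
      simp only [List.sum_append, List.sum_cons, List.sum_nil, add_zero] at this
      simp [this, runsSpec, hx]

-- ===== VERDICT (by name: the statement is the Claim_ definition above) =====
theorem valovi_spec : Claim_equal_valovi := by
  intro po_dnevih _
  unfold Spec_valovi valovi valovi_alt
  have hA := valovi_fold po_dnevih po_dnevih 0 [] 0 (by simp)
  have hB := valovi_alt_fold po_dnevih [] []
  simp only [Nat.cast_zero] at hA
  simp only [List.sum_nil] at hB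
  rw [hA, hB, runsSpecA_eq_runsSpec po_dnevih 0 (fun _ => rfl)]
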